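-- pv_equiv track=rewrite | github.com/dobrso/AaDS | Classworks/17.05.2025 CW/Task 2.py | radixSortBits
-- ===== SOURCE A (Python) =====
-- from typing import List
--
-- def radixSortBits(arr: List[int], k: int) -> List[int]:
--     n = len(arr)
--     zeros = []
--     ones = []
--
--     for i in range(0, k):
--         zeros = []
--         ones = []
--
--         for j in range(0, n):
--             if (arr[j] >> i) & 1 == 0:
--                 zeros.append(arr[j])
--             else:
--                 ones.append(arr[j])
--
--         arr = zeros + ones
--
--     return arr
-- ===== SOURCE B (Python) =====
-- from typing import List
--
-- def radixSortBits(arr: List[int], k: int) -> List[int]: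
--     # MSD binary radix sort with an explicit stack (zeros pushed last, so popped first).
--     out = []
--     stack = [(arr, k - 1)]
--     while stack:
--         lst, i = stack.pop()
--         if i < 0 or len(lst) <= 1:
--             out.extend(lst)
--         else:
--             zeros = [x for x in lst if (x >> i) & 1 == 0]
--             ones = [x for x in lst if (x >> i) & 1 != 0]
--             stack.append((ones, i - 1))
--             stack.append((zeros, i - 1))
--     return out
-- ===== Notes on version B (the rewrite author's own statement) =====
-- stated objective: alternative
-- what changed: Replaced the LSD radix sort (k stable passes over the whole list, bit 0 upward) by an MSD recursive radix sort that partitions on the top bit and recurses on each half, stopping early on sublists of length <= 1.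
import Mathlib
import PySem

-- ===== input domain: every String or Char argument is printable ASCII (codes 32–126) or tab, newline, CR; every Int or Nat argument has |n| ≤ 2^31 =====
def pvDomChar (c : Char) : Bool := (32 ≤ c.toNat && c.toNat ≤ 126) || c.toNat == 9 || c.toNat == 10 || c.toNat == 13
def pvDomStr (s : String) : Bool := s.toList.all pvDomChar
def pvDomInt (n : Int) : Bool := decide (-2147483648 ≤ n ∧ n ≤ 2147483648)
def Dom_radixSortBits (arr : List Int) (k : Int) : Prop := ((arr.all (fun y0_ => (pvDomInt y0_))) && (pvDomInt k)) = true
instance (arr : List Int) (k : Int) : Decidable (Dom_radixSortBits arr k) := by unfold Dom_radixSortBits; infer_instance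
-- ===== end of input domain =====

-- B replaces A's LSD (least-significant-bit-first) pass loop by an MSD recursive radix sort
-- that partitions on the top bit and recurses on each half (objective: alternative algorithm).

-- ===== PORT A =====
-- zero-bit test shared by both ports: Python's '(x >> i) & 1 == 0' with i ≥ 0 (exact: >> is Lean's >>>)
def pvTz (i : Nat) (x : Int) : Bool := (Int.land (x >>> i) 1) == 0

def radixSortBits (arr : List Int) (k : Int) : List Int :=
  let n := PySem.List.len arr
  (PySem.List.pyRange 0 k 1).foldl (fun a i =>
    -- inner loop: j in range(0, n), arr[j]; j is always in range so pyGetD is exact here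
    let zo := (PySem.List.pyRange 0 n 1).foldl
      (fun (zo : List Int × List Int) j =>
        if pvTz i.toNat (PySem.List.pyGetD a j 0) then
          (zo.1 ++ [PySem.List.pyGetD a j 0], zo.2)
        else
          (zo.1, zo.2 ++ [PySem.List.pyGetD a j 0]))
      ([], [])
    zo.1 ++ zo.2) arr

-- ===== PORT B =====
-- while-loop over an explicit stack; termination measure: sum of 3^(i+1) over stack entries
def pvStackLoop : List (List Int × Int) → List Int → List Int
  | [], out => out
  | (lst, i) :: st, out =>
    if i < 0 ∨ lst.length ≤ 1 then
      pvStackLoop st (out ++ lst)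
    else
      -- Python pushes ones then zeros; the popped-first (top) entry is zeros = head of the cons
      pvStackLoop ((lst.filter (fun x => pvTz i.toNat x), i - 1)
        :: (lst.filter (fun x => !pvTz i.toNat x), i - 1) :: st) out
termination_by st _ => (st.map (fun p => 3 ^ (p.2 + 1).toNat)).sum
decreasing_by
  · have h : 0 < 3 ^ ((i + 1).toNat) := pow_pos (by norm_num) _
    simp only [List.map_cons, List.sum_cons]
    omega
  · have ht : (i - 1 + 1).toNat = i.toNat := by omega
    have hi : (i + 1).toNat = i.toNat + 1 := by omega
    have h : 0 < 3 ^ i.toNat := pow_pos (by norm_num) _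
    simp only [List.map_cons, List.sum_cons, ht, hi, pow_succ]
    omega

def radixSortBits_alt (arr : List Int) (k : Int) : List Int :=
  pvStackLoop [(arr, k - 1)] []

-- ===== PRECONDITION & SPEC =====
def Spec_radixSortBits (arr : List Int) (k : Int) (out : List Int) : Prop := out = radixSortBits_alt arr k
instance (arr : List Int) (k : Int) (out : List Int) : Decidable (Spec_radixSortBits arr k out) := by unfold Spec_radixSortBits; infer_instance

-- ===== CLAIM (what is proved, stated in full; the proofs are below) =====
def Claim_equal_radixSortBits : Prop := ∀ (arr : List Int) (k : Int), Dom_radixSortBits arr k → Spec_radixSortBits arr k (radixSortBits arr k)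

-- ===== LEMMAS AND PROOFS =====

-- recursive reference form of the MSD sort (proof-side only)
def pvMsdRec (lst : List Int) (i : Int) : List Int :=
  if i < 0 ∨ lst.length ≤ 1 then lst
  else
    pvMsdRec (lst.filter (fun x => pvTz i.toNat x)) (i - 1) ++
    pvMsdRec (lst.filter (fun x => !pvTz i.toNat x)) (i - 1)
termination_by (i + 1).toNat
decreasing_by all_goals omega

theorem pvStackLoop_eq (st : List (List Int × Int)) (out : List Int) :
    pvStackLoop st out = out ++ (st.map (fun p => pvMsdRec p.1 p.2)).flatten := by
  fun_induction pvStackLoop with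
  | case1 out => simp
  | case2 lst i st out h ih =>
    simp only [List.map_cons, List.flatten_cons]
    rw [ih, pvMsdRec, if_pos h]
    simp
  | case3 lst i st out h ih =>
    simp only [List.unattach_filter, List.unattach_attach] at ih
    simp only [List.map_cons, List.flatten_cons]
    rw [ih, pvMsdRec, if_neg h]
    simp

-- one stable partition pass on bit i: zeros then ones
def pvPass (i : Int) (l : List Int) : List Int :=
  l.filter (fun x => pvTz i.toNat x) ++ l.filter (fun x => !pvTz i.toNat x)

-- LSD as a fold of passes over a list of bit indices
def pvL (idxs : List Int) (l : List Int) : List Int := idxs.foldl (fun a i => pvPass i a) l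

-- MSD without the length guard, fuel = number of bits (top bit = m-1)
def pvMsd : Nat → List Int → List Int
  | 0, l => l
  | (m+1), l => pvMsd m (l.filter (fun x => pvTz m x)) ++ pvMsd m (l.filter (fun x => !pvTz m x))

theorem pvPass_length (i : Int) (l : List Int) : (pvPass i l).length = l.length :=
  (List.filter_append_perm _ l).length_eq

theorem pvInnerFold (i : Int) (l : List Int) (z o : List Int) :
    l.foldl (fun (zo : List Int × List Int) x =>
        if pvTz i.toNat x then (zo.1 ++ [x], zo.2) else (zo.1, zo.2 ++ [x])) (z, o)
      = (z ++ l.filter (fun x => pvTz i.toNat x), o ++ l.filter (fun x => !pvTz i.toNat x)) := by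
  induction l generalizing z o with
  | nil => simp
  | cons a t ih =>
    by_cases h : pvTz i.toNat a <;> simp [List.foldl_cons, h, ih]

-- A's port equals folding pvPass, as long as the running list keeps length n
theorem pvA_fold (idxs : List Int) (a : List Int) (n : Int) (h : (a.length : Int) = n) :
    idxs.foldl (fun a i =>
      let zo := (PySem.List.pyRange 0 n 1).foldl
        (fun (zo : List Int × List Int) j =>
          if pvTz i.toNat (PySem.List.pyGetD a j 0) then
            (zo.1 ++ [PySem.List.pyGetD a j 0], zo.2)
          else
            (zo.1, zo.2 ++ [PySem.List.pyGetD a j 0]))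
        ([], [])
      zo.1 ++ zo.2) a = pvL idxs a := by
  induction idxs generalizing a with
  | nil => simp [pvL]
  | cons i rest ih =>
    have hbody : (PySem.List.pyRange 0 n 1).foldl
        (fun (zo : List Int × List Int) j =>
          if pvTz i.toNat (PySem.List.pyGetD a j 0) then
            (zo.1 ++ [PySem.List.pyGetD a j 0], zo.2)
          else
            (zo.1, zo.2 ++ [PySem.List.pyGetD a j 0]))
        ([], [])
        = ([] ++ a.filter (fun x => pvTz i.toNat x), [] ++ a.filter (fun x => !pvTz i.toNat x)) := by
      rw [← h, ← PySem.List.len_eq,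
        PySem.List.foldl_pyRange_zero_pyGetD a 0
          (fun (zo : List Int × List Int) x =>
            if pvTz i.toNat x then (zo.1 ++ [x], zo.2) else (zo.1, zo.2 ++ [x])) ([], [])]
      exact pvInnerFold i a [] []
    simp only [List.foldl_cons, hbody]
    have hlen : (((a.filter (fun x => pvTz i.toNat x) ++ a.filter (fun x => !pvTz i.toNat x)).length : Int)) = n := by
      have := pvPass_length i a
      simp only [pvPass] at this
      rw [this]; exact h
    simpa [pvL, pvPass] using ih _ hlen

theorem pvFilter_pass (p : Int → Bool) (i : Int) (l : List Int) :
    (pvPass i l).filter p = pvPass i (l.filter p) := by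
  simp only [pvPass, List.filter_append, List.filter_filter]
  congr 1 <;> exact List.filter_congr (fun x _ => by rw [Bool.and_comm])

theorem pvFilter_L (p : Int → Bool) (idxs : List Int) (l : List Int) :
    (pvL idxs l).filter p = pvL idxs (l.filter p) := by
  induction idxs generalizing l with
  | nil => simp [pvL]
  | cons i rest ih =>
    simp only [pvL, List.foldl_cons] at *
    rw [ih, pvFilter_pass]

theorem pvL_eq_pvMsd (m : Nat) (l : List Int) :
    pvL (PySem.List.pyRange 0 (m : Int) 1) l = pvMsd m l := by
  induction m generalizing l with
  | zero => simp [PySem.List.pyRange_one_eq_nil, pvL, pvMsd]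
  | succ m ih =>
    have hsplit : PySem.List.pyRange 0 ((m : Int) + 1) 1
        = PySem.List.pyRange 0 (m : Int) 1 ++ [(m : Int)] := by
      simpa using PySem.List.pyRange_one_succ_right (a := 0) (b := (m : Int)) (by positivity)
    have : pvL (PySem.List.pyRange 0 (m : Int) 1 ++ [(m : Int)]) l
        = pvPass (m : Int) (pvL (PySem.List.pyRange 0 (m : Int) 1) l) := by
      simp [pvL, List.foldl_append]
    rw [show ((m : Int) + 1) = ((m + 1 : Nat) : Int) by push_cast; ring] at hsplit
    rw [hsplit, this, pvPass]
    have hm : ((m : Int)).toNat = m := Int.toNat_natCast m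
    rw [hm, pvFilter_L, pvFilter_L, ih, ih, pvMsd]

theorem pvMsd_short (m : Nat) (l : List Int) (h : l.length ≤ 1) : pvMsd m l = l := by
  induction m generalizing l with
  | zero => rfl
  | succ m ih =>
    match l, h with
    | [], _ => simp [pvMsd, ih]
    | [a], _ =>
      by_cases ha : pvTz m a <;>
        simp [pvMsd, ha, ih]

theorem pvMsdRec_eq (m : Nat) : ∀ (i : Int), (i + 1).toNat = m → ∀ l, pvMsdRec l i = pvMsd m l := by
  induction m with
  | zero =>
    intro i hi l
    have hneg : i < 0 := by omega
    rw [pvMsdRec]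
    simp [hneg, pvMsd]
  | succ m ih =>
    intro i hi l
    have hpos : ¬ i < 0 := by omega
    rw [pvMsdRec]
    by_cases hl : l.length ≤ 1
    · simp only [hpos, hl, or_true, if_true]
      exact (pvMsd_short _ _ hl).symm
    · simp only [hpos, hl, or_false, if_false]
      have h1 : (i - 1 + 1).toNat = m := by omega
      have hit : i.toNat = m := by omega
      rw [ih _ h1, ih _ h1, hit, pvMsd]

theorem pvA_eq_msd (arr : List Int) (k : Int) : radixSortBits arr k = pvMsd k.toNat arr := by
  have hrange : PySem.List.pyRange 0 k 1 = PySem.List.pyRange 0 (k.toNat : Int) 1 := by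
    rcases le_or_gt k 0 with hk | hk
    · rw [PySem.List.pyRange_one_eq_nil hk, PySem.List.pyRange_one_eq_nil (by omega)]
    · rw [Int.toNat_of_nonneg (le_of_lt hk)]
  unfold radixSortBits
  rw [pvA_fold _ _ _ (by simp [PySem.List.len_eq]), hrange, pvL_eq_pvMsd]

-- ===== VERDICT (by name: the statement is the Claim_ definition above) =====
theorem radixSortBits_spec : Claim_equal_radixSortBits := by
  intro arr k _
  unfold Spec_radixSortBits radixSortBits_alt
  rw [pvA_eq_msd, pvStackLoop_eq]
  simp [pvMsdRec_eq k.toNat (k - 1) (by omega)]
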